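-- pv_equiv track=rewrite | github.com/LVala/agh-cs | data_structures_and_algorithms/zestaw_3/zad2.py | insert2heap
-- ===== SOURCE A (Python) =====
-- def insert2heap(T, a):
--     def heapify(T, i):
--         parent = (i-1)//2
--
--         if i != 0 and T[parent] < T[i]:
--             T[parent], T[i] = T[i], T[parent]
--             heapify(T, parent)
--
--     def extend_and_add(T, a):
--         n = len(T)
--         temp_T = [0]*(n + 1)
--         for i in range(n):
--             temp_T[i] = T[i]
--         temp_T[n] = a
--         return temp_T
--
--     n = len(T)
--     new_T = extend_and_add(T, a)
--     heapify(new_T, n)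
--     return new_T
-- ===== SOURCE B (Python) =====
-- def insert2heap(T, a):
--     new_T = T + [a]
--     i = len(T)
--     while i != 0 and new_T[(i - 1) // 2] < a:
--         new_T[i] = new_T[(i - 1) // 2]
--         i = (i - 1) // 2
--     new_T[i] = a
--     return new_T
-- ===== Notes on version B (the rewrite author's own statement) =====
-- stated objective: simpler
-- what changed: Replaced A's recursive swap-based heapify plus manual replicate-and-copy helper with a single flat function: new_T = T + [a] and an iterative hole-shifting sift-up that moves smaller ancestors down and writes a once at its final position.
import Mathlib
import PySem

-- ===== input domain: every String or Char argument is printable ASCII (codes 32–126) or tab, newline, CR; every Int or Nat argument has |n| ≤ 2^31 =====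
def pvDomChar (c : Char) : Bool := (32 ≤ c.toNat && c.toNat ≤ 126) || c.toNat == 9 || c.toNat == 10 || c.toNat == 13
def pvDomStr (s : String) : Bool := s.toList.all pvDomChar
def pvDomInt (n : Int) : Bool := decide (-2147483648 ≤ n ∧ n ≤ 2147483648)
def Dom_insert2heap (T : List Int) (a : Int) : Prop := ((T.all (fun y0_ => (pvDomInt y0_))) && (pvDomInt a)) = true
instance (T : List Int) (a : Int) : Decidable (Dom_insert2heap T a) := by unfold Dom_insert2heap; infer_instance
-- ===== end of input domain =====

-- B replaces A's recursive swap-based heapify and manual copy loop with `T + [a]` and a flat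
-- hole-shifting sift-up loop (objective: simpler). A mutates nothing observable (it copies T first);
-- B likewise leaves T unchanged.

-- ===== PORT A =====
-- heapify(T, i): recursive swap-with-parent.  All indexing in A is in range on every call A makes,
-- so the `none` fallbacks of pyGet? are unreachable; Python's parent = (i-1)//2 equals Nat (i-1)/2
-- in the i ≠ 0 branch where it is read.
def heapifyA (T : List Int) (i : Nat) : List Int :=
  let parent := (i - 1) / 2
  if _h : i ≠ 0 then
    match PySem.List.pyGet? T (parent : Int), PySem.List.pyGet? T (i : Int) with
    | some tp, some ti =>
        if tp < ti then heapifyA ((T.set parent ti).set i tp) parent else T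
    | _, _ => T
  else T
termination_by i
decreasing_by omega

-- extend_and_add(T, a): temp_T = [0]*(n+1); copy loop over range(n); temp_T[n] = a
def extendAndAdd (T : List Int) (a : Int) : List Int :=
  let n := T.length
  let temp := List.replicate (n + 1) (0 : Int)
  let temp := (PySem.List.pyRange 0 (n : Int) 1).foldl
      (fun acc i => acc.set i.toNat (PySem.List.pyGetD T i 0)) temp
  temp.set n a

def insert2heap (T : List Int) (a : Int) : List Int :=
  let n := T.length
  let new_T := extendAndAdd T a
  heapifyA new_T n

-- ===== PORT B =====
-- the while loop of Source B: shift parents down past the hole at i while they are < a, then place a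
def siftUpAlt (xs : List Int) (i : Nat) (a : Int) : List Int :=
  if _h : i ≠ 0 then
    match PySem.List.pyGet? xs (((i - 1) / 2 : Nat) : Int) with
    | some xp => if xp < a then siftUpAlt (xs.set i xp) ((i - 1) / 2) a else xs.set i a
    | none => xs
  else xs.set i a
termination_by i
decreasing_by omega

def insert2heap_alt (T : List Int) (a : Int) : List Int :=
  siftUpAlt (T ++ [a]) T.length a

-- ===== PRECONDITION & SPEC =====
def Spec_insert2heap (T : List Int) (a : Int) (out : List Int) : Prop := out = insert2heap_alt T a
instance (T : List Int) (a : Int) (out : List Int) : Decidable (Spec_insert2heap T a out) := by unfold Spec_insert2heap; infer_instance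

-- ===== CLAIM (what is proved, stated in full; the proofs are below) =====
def Claim_equal_insert2heap : Prop := ∀ (T : List Int) (a : Int), Dom_insert2heap T a → Spec_insert2heap T a (insert2heap T a)

-- ===== LEMMAS AND PROOFS =====

-- the copy loop of extend_and_add writes T over the first n cells of acc
lemma copy_loop (T : List Int) : ∀ (n : Nat) (acc : List Int), n ≤ T.length → n ≤ acc.length →
    (PySem.List.pyRange 0 (n : Int) 1).foldl
      (fun acc i => acc.set i.toNat (PySem.List.pyGetD T i 0)) acc
    = T.take n ++ acc.drop n := by
  intro n
  induction n with
  | zero => intro acc _ _; simp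
  | succ n ih =>
    intro acc hT hacc
    have hcast : ((n + 1 : Nat) : Int) = (n : Int) + 1 := by push_cast; ring
    rw [hcast, PySem.List.pyRange_one_succ_right (by positivity)]
    rw [List.foldl_append, ih acc (by omega) (by omega)]
    simp only [List.foldl_cons, List.foldl_nil, Int.toNat_natCast]
    have hget : PySem.List.pyGetD T (n : Int) 0 = T[n]'(by omega) := by
      rw [PySem.List.pyGetD_natCast]; simp [List.getElem?_eq_getElem (by omega : n < T.length)]
    have hdrop : acc.drop n = acc[n]'(by omega) :: acc.drop (n + 1) :=
      List.drop_eq_getElem_cons (by omega)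
    have htake : T.take (n + 1) = T.take n ++ [T[n]'(by omega)] := by
      rw [List.take_add_one]; simp [List.getElem?_eq_getElem (by omega : n < T.length)]
    rw [hget, hdrop, htake]
    have hmin : (List.take n T).length = n := by simp; omega
    rw [List.set_append_right _ _ (by rw [hmin])]
    rw [hmin, Nat.sub_self, List.set_cons_zero, List.append_assoc]
    rfl

lemma extendAndAdd_eq (T : List Int) (a : Int) : extendAndAdd T a = T ++ [a] := by
  show ((PySem.List.pyRange 0 (T.length : Int) 1).foldl
      (fun acc i => acc.set i.toNat (PySem.List.pyGetD T i 0))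
      (List.replicate (T.length + 1) 0)).set T.length a = T ++ [a]
  rw [copy_loop T T.length (List.replicate (T.length + 1) 0) le_rfl (by simp)]
  simp only [List.take_length, List.drop_replicate]
  have : T.length + 1 - T.length = 1 := by omega
  rw [this, List.set_append_right _ _ (by simp)]
  simp

-- siftUpAlt never reads position p before overwriting it
lemma sift_set_self (p : Nat) (zs : List Int) (v w : Int) (hp : p < zs.length) :
    siftUpAlt (zs.set p w) p v = siftUpAlt zs p v := by
  rw [siftUpAlt, siftUpAlt]
  by_cases h0 : p ≠ 0
  · simp only [dif_pos h0]
    have hlt : (p - 1) / 2 < p := by omega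
    have hget : PySem.List.pyGet? (zs.set p w) (((p - 1) / 2 : Nat) : Int)
        = PySem.List.pyGet? zs (((p - 1) / 2 : Nat) : Int) := by
      rw [PySem.List.pyGet?_natCast, PySem.List.pyGet?_natCast,
        List.getElem?_set_ne (by omega : p ≠ (p - 1) / 2)]
    rw [hget]
    cases hx : PySem.List.pyGet? zs (((p - 1) / 2 : Nat) : Int) with
    | none =>
      exfalso
      rw [PySem.List.pyGet?_natCast] at hx
      exact absurd hx (by simp [List.getElem?_eq_getElem (by omega : (p - 1) / 2 < zs.length)])
    | some xp =>
      by_cases hcmp : xp < v <;> simp [hcmp, List.set_set]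
  · simp only [dif_neg h0, List.set_set]

-- main invariant: A's heapify at i, where xs[i] is the sifted value v, equals B's hole loop
lemma heapify_eq_sift (i : Nat) : ∀ (xs : List Int) (v : Int) (hi : i < xs.length),
    xs[i] = v → heapifyA xs i = siftUpAlt xs i v := by
  induction i using Nat.strong_induction_on with
  | _ i IH =>
    intro xs v hi hv
    rw [heapifyA, siftUpAlt]
    by_cases h0 : i ≠ 0
    · simp only [dif_pos h0]
      have hp : (i - 1) / 2 < i := by omega
      have hplen : (i - 1) / 2 < xs.length := by omega
      have hgi : PySem.List.pyGet? xs (i : Int) = some v := by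
        rw [PySem.List.pyGet?_natCast]; simp [List.getElem?_eq_getElem hi, hv]
      have hgp : PySem.List.pyGet? xs (((i - 1) / 2 : Nat) : Int)
          = some (xs[(i - 1) / 2]'hplen) := by
        rw [PySem.List.pyGet?_natCast]; simp [List.getElem?_eq_getElem hplen]
      rw [hgi, hgp]
      set p := (i - 1) / 2 with hpdef
      set xp := xs[p]'hplen with hxpdef
      by_cases hcmp : xp < v
      · simp only [if_pos hcmp]
        have hne : p ≠ i := by omega
        have hcomm : (xs.set p v).set i xp = (xs.set i xp).set p v :=
          List.set_comm _ _ hne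
        have hlen2 : p < ((xs.set i xp).set p v).length := by simpa using hplen
        have hval : ((xs.set i xp).set p v)[p]'hlen2 = v := List.getElem_set_self _
        rw [hcomm, IH p hp _ v hlen2 hval,
          sift_set_self p (xs.set i xp) v v (by simpa using hplen)]
      · simp only [if_neg hcmp]
        rw [← hv, List.set_getElem_self]
    · simp only [dif_neg h0]
      rw [← hv, List.set_getElem_self]

-- ===== VERDICT (by name: the statement is the Claim_ definition above) =====
theorem insert2heap_spec : Claim_equal_insert2heap := by
  intro T a _
  unfold Spec_insert2heap insert2heap insert2heap_alt
  simp only [extendAndAdd_eq]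
  exact heapify_eq_sift T.length (T ++ [a]) a (by simp) (by simp)
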